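-- pv_equiv track=rewrite | github.com/thinguyend/learn-bayes | fanned_garden_svg.py | get_1st_layer_degs
-- ===== SOURCE A (Python) =====
-- d = 180
--
-- def get_1st_layer_degs(deg=d):
--     x, z = 50, 15
--     list_of_degs = []
--     deg -= z
--     list_of_degs.append(deg)
--     for i in range(3):
--         deg -= x
--         list_of_degs.append(deg)
--     return list_of_degs
-- ===== SOURCE B (Python) =====
-- d = 180
--
-- def get_1st_layer_degs(deg=d):
--     return [deg - 15 - 50 * i for i in range(4)]
-- ===== Notes on version B (the rewrite author's own statement) =====
-- stated objective: simpler
-- what changed: Replaces the stateful running-subtraction accumulator over a loop by a closed form: element i is deg-15-50*i directly, computed in one comprehension.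
import Mathlib
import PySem

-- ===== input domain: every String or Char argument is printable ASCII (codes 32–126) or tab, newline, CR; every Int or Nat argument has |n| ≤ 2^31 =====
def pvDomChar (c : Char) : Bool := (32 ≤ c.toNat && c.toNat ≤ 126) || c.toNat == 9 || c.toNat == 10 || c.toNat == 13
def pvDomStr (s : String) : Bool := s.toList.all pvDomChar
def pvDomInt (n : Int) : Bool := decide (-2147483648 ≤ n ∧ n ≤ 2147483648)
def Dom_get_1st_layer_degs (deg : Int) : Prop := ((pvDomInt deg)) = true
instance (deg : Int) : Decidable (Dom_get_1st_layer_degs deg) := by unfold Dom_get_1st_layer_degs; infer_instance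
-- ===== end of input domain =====

-- B replaces A's running-subtraction accumulator by the closed form deg-15-50*i (objective: simpler).
-- ===== PORT A =====
-- A: running subtraction with an accumulator list, loop over range(3)
def get_1st_layer_degs (deg : Int) : List Int :=
  let x : Int := 50
  let z : Int := 15
  let list_of_degs : List Int := []
  let deg := deg - z
  let list_of_degs := list_of_degs ++ [deg]
  let st := (PySem.List.pyRange 0 3 1).foldl
    (fun (st : Int × List Int) (_i : Int) =>
      let deg := st.1 - x
      (deg, st.2 ++ [deg])) (deg, list_of_degs)
  st.2

-- ===== PORT B =====
-- B: closed form, element i is deg - 15 - 50*i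
def get_1st_layer_degs_alt (deg : Int) : List Int :=
  (PySem.List.pyRange 0 4 1).map (fun i => deg - 15 - 50 * i)

-- ===== PRECONDITION & SPEC =====
def Spec_get_1st_layer_degs (deg : Int) (out : List Int) : Prop := out = get_1st_layer_degs_alt deg
instance (deg : Int) (out : List Int) : Decidable (Spec_get_1st_layer_degs deg out) := by unfold Spec_get_1st_layer_degs; infer_instance

-- ===== CLAIM (what is proved, stated in full; the proofs are below) =====
def Claim_equal_get_1st_layer_degs : Prop := ∀ (deg : Int), Dom_get_1st_layer_degs deg → Spec_get_1st_layer_degs deg (get_1st_layer_degs deg)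

-- ===== LEMMAS AND PROOFS =====

-- ===== VERDICT (by name: the statement is the Claim_ definition above) =====
theorem get_1st_layer_degs_spec : Claim_equal_get_1st_layer_degs := by
  intro deg _
  unfold Spec_get_1st_layer_degs get_1st_layer_degs get_1st_layer_degs_alt
  simp [PySem.List.pyRange, List.range_succ]
  norm_num
  omega
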